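-- pv_equiv track=rewrite | github.com/Yunkeun/Algorithm | Programmers/Level1/완주하지못한선수.py | solution
-- ===== SOURCE A (Python) =====
-- def solution(participant, completion):
--     answer = ''
--     participant.sort()
--     completion.sort()
--     for x in participant:
--         if x not in completion:
--             answer = x
--             return answer
--         else:
--             completion.remove(x)
--
--     return answer
-- ===== SOURCE B (Python) =====
-- def solution(participant, completion):
--     participant.sort()
--     completion.sort()
--     j = 0
--     n = len(completion)
--     for x in participant:
--         while j < n and completion[j] < x:
--             j += 1
--         if j < n and completion[j] == x:
--             j += 1
--         else:
--             return x
--     return ''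
-- ===== Notes on version B (the rewrite author's own statement) =====
-- stated objective: faster
-- what changed: Replaces A's per-participant membership test and remove() scan over the shrinking completion list with a single two-pointer merge walk over the two sorted lists (an index into completion advances past smaller elements, a match advances it by one), so no list is searched or mutated during the walk.
import Mathlib
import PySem

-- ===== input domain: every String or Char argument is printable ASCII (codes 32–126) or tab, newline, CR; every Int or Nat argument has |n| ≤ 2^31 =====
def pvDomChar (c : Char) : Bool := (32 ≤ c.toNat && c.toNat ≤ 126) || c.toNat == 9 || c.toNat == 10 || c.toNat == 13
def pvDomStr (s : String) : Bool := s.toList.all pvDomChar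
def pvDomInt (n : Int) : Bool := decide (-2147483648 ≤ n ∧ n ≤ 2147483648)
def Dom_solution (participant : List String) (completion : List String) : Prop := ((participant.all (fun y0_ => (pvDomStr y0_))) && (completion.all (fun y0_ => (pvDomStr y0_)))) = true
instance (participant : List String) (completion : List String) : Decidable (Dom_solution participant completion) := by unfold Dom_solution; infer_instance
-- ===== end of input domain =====

-- B replaces A's membership/remove scans with a two-pointer merge walk of the two sorted lists; faster per the check.
-- RETURN-value equivalence only: A sorts both arguments in place and removes matched elements from completion; B sorts both in place but removes nothing.

-- ===== PORT A =====
-- 'for x in participant: if x not in completion: return x else completion.remove(x)'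
def solutionLoopA : List String → List String → String
  | [], _ => ""
  | x :: rest, comp =>
    if x ∈ comp then
      solutionLoopA rest ((PySem.List.remove? comp x).getD comp)
    else x

def solution (participant : List String) (completion : List String) : String :=
  solutionLoopA (PySem.List.sorted participant (fun s => s) false)
    (PySem.List.sorted completion (fun s => s) false)

-- ===== PORT B =====
-- 'while j < n and completion[j] < x: j += 1'
def skipB (comp : List String) (x : String) (j : Nat) : Nat :=
  match h : comp[j]? with
  | some c => if c < x then skipB comp x (j + 1) else j
  | none => j
termination_by comp.length - j
decreasing_by
  have := (List.getElem?_eq_some_iff.mp h).1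
  omega

-- 'for x in participant: <while loop>; if j < n and completion[j] == x: j += 1 else: return x'
def solutionLoopB (comp : List String) : List String → Nat → String
  | [], _ => ""
  | x :: rest, j =>
    let j' := skipB comp x j
    match comp[j']? with
    | some c => if c == x then solutionLoopB comp rest (j' + 1) else x
    | none => x

def solution_alt (participant : List String) (completion : List String) : String :=
  solutionLoopB (PySem.List.sorted completion (fun s => s) false)
    (PySem.List.sorted participant (fun s => s) false) 0

-- ===== PRECONDITION & SPEC =====
def Spec_solution (participant : List String) (completion : List String) (out : String) : Prop := out = solution_alt participant completion
instance (participant : List String) (completion : List String) (out : String) : Decidable (Spec_solution participant completion out) := by unfold Spec_solution; infer_instance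

-- ===== CLAIM =====
def Claim_equal_solution : Prop := ∀ (participant : List String) (completion : List String), Dom_solution participant completion → Spec_solution participant completion (solution participant completion)

-- ===== LEMMAS AND PROOFS =====

-- skipB skips exactly a prefix of the remaining completion whose elements are < x,
-- and stops at an element that is not < x (or at the end).
theorem skipB_spec (comp : List String) (x : String) (j : Nat) :
    ∃ S : List String,
      comp.drop j = S ++ comp.drop (skipB comp x j) ∧
      (∀ y ∈ S, y < x) ∧
      (∀ c, comp[skipB comp x j]? = some c → ¬ c < x) := by
  fun_induction skipB comp x j with
  | case1 j c h hlt ih =>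
    obtain ⟨S, hS, hall, hstop⟩ := ih
    refine ⟨c :: S, ?_, ?_, hstop⟩
    · have hj := (List.getElem?_eq_some_iff.mp h).1
      rw [List.drop_eq_getElem_cons hj]
      simp only [List.cons_append]
      rw [hS]
      congr 1
      exact (List.getElem?_eq_some_iff.mp h).2
    · intro y hy
      rcases List.mem_cons.mp hy with rfl | h2
      · exact hlt
      · exact hall y h2
  | case2 j c h hlt =>
    exact ⟨[], by simp, by simp, fun d hd => by rw [h] at hd; cases hd; exact hlt⟩
  | case3 j h =>
    exact ⟨[], by simp, by simp, fun d hd => by rw [h] at hd; cases hd⟩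

-- Main invariant: A's remaining completion list is L ++ comp.drop j where every element
-- of L is strictly below every remaining participant, comp is sorted, ps is sorted.
theorem loopA_eq_loopB (comp : List String) (hcomp : comp.Pairwise (fun a b => a ≤ b)) :
    ∀ (ps : List String) (L : List String) (j : Nat),
      ps.Pairwise (fun a b => a ≤ b) →
      (∀ y ∈ L, ∀ z ∈ ps, y < z) →
      solutionLoopA ps (L ++ comp.drop j) = solutionLoopB comp ps j := by
  intro ps
  induction ps with
  | nil => intro L j _ _; rfl
  | cons x rest ih =>
    intro L j hps hL
    obtain ⟨S, hS, hSlt, hstop⟩ := skipB_spec comp x j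
    set j' := skipB comp x j with hj'
    have hxrest : ∀ z ∈ rest, x ≤ z := (List.pairwise_cons.mp hps).1
    have hrestp : rest.Pairwise (fun a b => a ≤ b) := (List.pairwise_cons.mp hps).2
    have hLx : ∀ y ∈ L ++ S, y < x := by
      intro y hy
      rcases List.mem_append.mp hy with h1 | h2
      · exact hL y h1 x (by simp)
      · exact hSlt y h2
    have hcompL : L ++ comp.drop j = (L ++ S) ++ comp.drop j' := by
      rw [hS, List.append_assoc]
    have hxnotLS : x ∉ L ++ S := fun hmem => lt_irrefl x (hLx x hmem)
    cases hget : comp[j']? with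
    | none =>
      -- j' past the end: remaining completion is just L ++ S, all < x, so A returns x; B returns x.
      have hdrop : comp.drop j' = [] := by
        have := List.getElem?_eq_none_iff.mp hget
        exact List.drop_eq_nil_of_le this
      have hxnot : x ∉ L ++ comp.drop j := by
        rw [hcompL, hdrop, List.append_nil]; exact hxnotLS
      simp only [solutionLoopA, if_neg hxnot, solutionLoopB]
      rw [← hj', hget]
    | some c =>
      have hjlt := (List.getElem?_eq_some_iff.mp hget).1
      have hceq := (List.getElem?_eq_some_iff.mp hget).2
      have hdrop : comp.drop j' = c :: comp.drop (j' + 1) := by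
        rw [List.drop_eq_getElem_cons hjlt, hceq]
      have hcnlt : ¬ c < x := hstop c hget
      by_cases hcx : c = x
      · -- match: A removes the head occurrence; B advances j.
        subst hcx
        have hmem : c ∈ L ++ comp.drop j := by
          rw [hcompL, hdrop]; simp
        have herase : (L ++ comp.drop j).erase c = (L ++ S) ++ comp.drop (j' + 1) := by
          rw [hcompL, hdrop, List.erase_append_right _ hxnotLS, List.erase_cons_head]
        simp only [solutionLoopA, if_pos hmem]
        rw [PySem.List.remove?_eq_some_erase _ _ hmem, Option.getD_some, herase]
        have := ih ((L ++ S)) (j' + 1) hrestp (by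
          intro y hy z hz
          exact lt_of_lt_of_le (hLx y hy) (hxrest z hz))
        rw [this]
        simp only [solutionLoopB]
        rw [← hj', hget]
        simp
      · -- mismatch: c > x, the remaining completion is sorted ≥ c, so x is absent; both return x.
        have hxltc : x < c := lt_of_le_of_ne (le_of_not_gt hcnlt) (fun h => hcx h.symm)
        have hxnot : x ∉ L ++ comp.drop j := by
          rw [hcompL, hdrop]
          intro hmem
          rcases List.mem_append.mp hmem with h1 | h2
          · exact lt_irrefl x (hLx x h1)
          · have hpw : (comp.drop j').Pairwise (fun a b => a ≤ b) := hcomp.drop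
            rw [hdrop] at hpw
            rcases List.mem_cons.mp h2 with rfl | h4
            · exact lt_irrefl x hxltc
            · have : c ≤ x := (List.pairwise_cons.mp hpw).1 x h4
              exact absurd (lt_of_lt_of_le hxltc this) (lt_irrefl x)
        simp only [solutionLoopA, if_neg hxnot, solutionLoopB]
        rw [← hj', hget]
        simp only [beq_iff_eq]
        rw [if_neg hcx]

-- ===== VERDICT =====
theorem solution_spec : Claim_equal_solution := by
  intro participant completion _
  unfold Spec_solution solution solution_alt
  have h := loopA_eq_loopB (PySem.List.sorted completion (fun s => s) false)
    (PySem.List.sorted_pairwise completion (fun s => s))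
    (PySem.List.sorted participant (fun s => s) false) [] 0
    (PySem.List.sorted_pairwise participant (fun s => s))
    (by intro y hy; cases hy)
  simpa using h
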